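-- pv_equiv track=rewrite | github.com/pypi-data/pypi-mirror-346 | packages/acab/acab-1.0.3.tar.gz/acab-1.0.3/acab/acab.py | build_S_vectors
-- ===== SOURCE A (Python) =====
-- def build_S_vectors(sequences):
--     n_seqs = len(sequences)
--     aln_len = len(sequences[0][1])
--     pos_counters = [0] * n_seqs
--     S_vectors = []
--     for col in range(aln_len):
--         S = []
--         for i, (_, seq) in enumerate(sequences):
--             if seq[col] == '-':
--                 S.append('-')
--             else:
--                 pos_counters[i] += 1
--                 S.append(str(pos_counters[i]))
--         S_vectors.append(tuple(S))
--     return S_vectors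
-- ===== SOURCE B (Python) =====
-- def build_S_vectors(sequences):
--     aln_len = len(sequences[0][1])
--     rows = []
--     for _, seq in sequences:
--         counter = 0
--         row = []
--         for col in range(aln_len):
--             if seq[col] == '-':
--                 row.append('-')
--             else:
--                 counter += 1
--                 row.append(str(counter))
--         rows.append(row)
--     return [tuple(col) for col in zip(*rows)]
-- ===== Notes on version B (the rewrite author's own statement) =====
-- stated objective: alternative
-- what changed: Instead of a column-major loop maintaining a shared array of per-sequence counters, B computes each sequence's numbering row independently with a single local counter and then transposes the rows with zip(*rows).
import Mathlib
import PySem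

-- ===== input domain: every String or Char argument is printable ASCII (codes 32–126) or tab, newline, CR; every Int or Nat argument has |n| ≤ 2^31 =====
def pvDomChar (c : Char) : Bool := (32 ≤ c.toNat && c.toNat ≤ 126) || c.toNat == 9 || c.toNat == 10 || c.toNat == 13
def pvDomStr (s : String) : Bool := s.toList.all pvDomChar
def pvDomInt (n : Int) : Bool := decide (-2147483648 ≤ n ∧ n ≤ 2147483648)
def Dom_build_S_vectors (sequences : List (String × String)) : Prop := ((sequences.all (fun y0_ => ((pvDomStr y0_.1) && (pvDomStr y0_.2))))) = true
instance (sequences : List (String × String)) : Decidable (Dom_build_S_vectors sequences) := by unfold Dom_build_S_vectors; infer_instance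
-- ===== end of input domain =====

-- B replaces A's column-major loop over a shared counter array by independent per-sequence
-- rows (one local counter each) followed by a zip(*rows) transpose; same cost, different decomposition.

-- ===== PORT A =====
def build_S_vectors (sequences : List (String × String)) : List (List String) :=
  let n_seqs := sequences.length
  let aln_len : Nat := match PySem.List.pyGet? sequences 0 with
    | some p => p.2.toList.length   -- len(sequences[0][1]); none = IndexError, excluded by Pre_
    | none => 0
  let init : List Int × List (List String) := (List.replicate n_seqs 0, [])
  let res := (PySem.List.pyRange 0 (aln_len : Int) 1).foldl
    (fun st col =>
      let inner := sequences.zipIdx.foldl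
        (fun (q : List Int × List String) pi =>
          if PySem.Str.pyGet? pi.1.2 col = some '-' then
            (q.1, q.2 ++ ["-"])
          else
            let pcs := PySem.List.pySetD q.1 ((pi.2 : Nat) : Int) (PySem.List.pyGetD q.1 ((pi.2 : Nat) : Int) 0 + 1)
            (pcs, q.2 ++ [PySem.Int.toStr (PySem.List.pyGetD pcs ((pi.2 : Nat) : Int) 0)]))
        (st.1, ([] : List String))
      (inner.1, st.2 ++ [inner.2]))
    init
  res.2

-- ===== PORT B =====
-- zip(*rows): columns until the shortest row is exhausted; fuel = length of the first row
-- (an upper bound on the number of columns, so this is exactly Python's zip truncation)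
def pyZipStarGo {α : Type} [Inhabited α] (fuel : Nat) (rows : List (List α)) : List (List α) :=
  match fuel with
  | 0 => []
  | n+1 =>
    if rows.all (fun r => !r.isEmpty) then
      rows.map List.headI :: pyZipStarGo n (rows.map List.tail)
    else []

def pyZipStar {α : Type} [Inhabited α] (rows : List (List α)) : List (List α) :=
  match rows with
  | [] => []
  | r :: _ => pyZipStarGo r.length rows

def build_S_vectors_alt (sequences : List (String × String)) : List (List String) :=
  let aln_len : Nat := match PySem.List.pyGet? sequences 0 with
    | some p => p.2.toList.length   -- len(sequences[0][1]); none = IndexError, excluded by Pre_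
    | none => 0
  let rows := sequences.map (fun p =>
    ((PySem.List.pyRange 0 (aln_len : Int) 1).foldl
      (fun (q : Int × List String) col =>
        if PySem.Str.pyGet? p.2 col = some '-' then (q.1, q.2 ++ ["-"])
        else (q.1 + 1, q.2 ++ [PySem.Int.toStr (q.1 + 1)]))
      (0, ([] : List String))).2)
  pyZipStar rows

-- ===== PRECONDITION & SPEC =====
-- Pre_ excludes exactly the inputs where Python A raises IndexError: the empty list
-- (sequences[0] fails) and lists in which some sequence is shorter than the first one
-- (seq[col] fails for some col < aln_len).
def Pre_build_S_vectors (sequences : List (String × String)) : Prop :=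
  sequences ≠ [] ∧ ∀ p ∈ sequences, sequences.headI.2.toList.length ≤ p.2.toList.length
instance (sequences : List (String × String)) : Decidable (Pre_build_S_vectors sequences) := by
  unfold Pre_build_S_vectors; infer_instance

def pvWitness_build_S_vectors : (List (String × String)) := [("a", "A-C"), ("b", "-CGA")]

def Spec_build_S_vectors (sequences : List (String × String)) (out : List (List String)) : Prop := out = build_S_vectors_alt sequences
instance (sequences : List (String × String)) (out : List (List String)) : Decidable (Spec_build_S_vectors sequences out) := by unfold Spec_build_S_vectors; infer_instance

-- ===== CLAIM (what is proved, stated in full; the proofs are below) =====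
def Claim_equal_build_S_vectors : Prop := ∀ (sequences : List (String × String)), Dom_build_S_vectors sequences → Pre_build_S_vectors sequences → Spec_build_S_vectors sequences (build_S_vectors sequences)

-- ===== LEMMAS AND PROOFS =====

-- number of non-dash columns among the first c columns of s
def pvCnt (s : String) (c : Nat) : Int :=
  (((List.range c).countP (fun (j : Nat) => !decide (PySem.Str.pyGet? s (j : Int) = some '-'))) : Nat)

-- the string emitted for column c of sequence s
def pvCell (s : String) (c : Nat) : String :=
  if PySem.Str.pyGet? s (c : Int) = some '-' then "-" else PySem.Int.toStr (pvCnt s c + 1)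

theorem pvCnt_zero (s : String) : pvCnt s 0 = 0 := rfl

theorem pvCnt_succ (s : String) (c : Nat) :
    pvCnt s (c + 1) = if PySem.Str.pyGet? s (c : Int) = some '-' then pvCnt s c else pvCnt s c + 1 := by
  unfold pvCnt
  rw [List.range_succ, List.countP_append]
  by_cases h : PySem.Str.pyGet? s (c : Int) = some '-' <;> simp at h <;> simp [h]

theorem pv_getD_append_cons {α : Type} (done : List α) (x : α) (t : List α) (d : α) :
    (done ++ x :: t).getD done.length d = x := by
  induction done with
  | nil => rfl
  | cons a l ih => simp [ih]

theorem pv_set_append_cons {α : Type} (done : List α) (x v : α) (t : List α) :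
    (done ++ x :: t).set done.length v = done ++ v :: t := by
  induction done with
  | nil => rfl
  | cons a l ih => simp [ih]

-- A's inner loop over enumerate(sequences): counters and cells decompose pointwise
theorem pv_innerA (col : Int) (rest : List (String × String))
    (g : (String × String) → Int) :
    ∀ (k : Nat) (done : List Int) (S : List String), done.length = k →
    ((rest.zipIdx k).foldl
        (fun (q : List Int × List String) pi =>
          if PySem.Str.pyGet? pi.1.2 col = some '-' then
            (q.1, q.2 ++ ["-"])
          else
            (PySem.List.pySetD q.1 ((pi.2 : Nat) : Int) (PySem.List.pyGetD q.1 ((pi.2 : Nat) : Int) 0 + 1),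
             q.2 ++ [PySem.Int.toStr (PySem.List.pyGetD (PySem.List.pySetD q.1 ((pi.2 : Nat) : Int) (PySem.List.pyGetD q.1 ((pi.2 : Nat) : Int) 0 + 1)) ((pi.2 : Nat) : Int) 0)]))
        (done ++ rest.map g, S))
      = (done ++ rest.map (fun p => if PySem.Str.pyGet? p.2 col = some '-' then g p else g p + 1),
         S ++ rest.map (fun p => if PySem.Str.pyGet? p.2 col = some '-' then "-" else PySem.Int.toStr (g p + 1))) := by
  induction rest with
  | nil => intro k done S hk; simp
  | cons p rest ih =>
    intro k done S hk
    rw [List.zipIdx_cons, List.foldl_cons]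
    simp only [PySem.Str.pyGet?_eq] at ih ⊢
    by_cases h : PySem.Chars.pyGet? p.2.toList col = some '-'
    · simp only [List.map_cons, if_pos h]
      have h2 := ih (k + 1) (done ++ [g p]) (S ++ ["-"]) (by simp [hk])
      simp only [List.append_assoc, List.cons_append, List.nil_append] at h2 ⊢
      rw [h2]
    · simp only [List.map_cons, if_neg h]
      have hget : PySem.List.pyGetD (done ++ g p :: List.map g rest) ((k : Nat) : Int) 0 = g p := by
        rw [PySem.List.pyGetD_natCast, ← hk, pv_getD_append_cons]
      rw [hget]
      have hset : PySem.List.pySetD (done ++ g p :: List.map g rest) ((k : Nat) : Int) (g p + 1)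
          = done ++ (g p + 1) :: List.map g rest := by
        rw [PySem.List.pySetD_natCast, ← hk, pv_set_append_cons]
      rw [hset]
      have hget2 : PySem.List.pyGetD (done ++ (g p + 1) :: List.map g rest) ((k : Nat) : Int) 0 = g p + 1 := by
        rw [PySem.List.pyGetD_natCast, ← hk, pv_getD_append_cons]
      rw [hget2]
      have h2 := ih (k + 1) (done ++ [g p + 1]) (S ++ [PySem.Int.toStr (g p + 1)]) (by simp [hk])
      simp only [List.append_assoc, List.cons_append, List.nil_append] at h2 ⊢
      rw [h2]

-- A's outer loop: after n columns the counters are the per-sequence counts and the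
-- accumulated vectors are the column cells
theorem pv_outerA (sequences : List (String × String)) (n : Nat) :
    (List.range n).foldl
      (fun st (c : Nat) =>
        ((sequences.zipIdx.foldl
          (fun (q : List Int × List String) pi =>
            if PySem.Str.pyGet? pi.1.2 (c : Int) = some '-' then
              (q.1, q.2 ++ ["-"])
            else
              (PySem.List.pySetD q.1 ((pi.2 : Nat) : Int) (PySem.List.pyGetD q.1 ((pi.2 : Nat) : Int) 0 + 1),
               q.2 ++ [PySem.Int.toStr (PySem.List.pyGetD (PySem.List.pySetD q.1 ((pi.2 : Nat) : Int) (PySem.List.pyGetD q.1 ((pi.2 : Nat) : Int) 0 + 1)) ((pi.2 : Nat) : Int) 0)]))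
          (st.1, ([] : List String))).1,
         st.2 ++ [(sequences.zipIdx.foldl
          (fun (q : List Int × List String) pi =>
            if PySem.Str.pyGet? pi.1.2 (c : Int) = some '-' then
              (q.1, q.2 ++ ["-"])
            else
              (PySem.List.pySetD q.1 ((pi.2 : Nat) : Int) (PySem.List.pyGetD q.1 ((pi.2 : Nat) : Int) 0 + 1),
               q.2 ++ [PySem.Int.toStr (PySem.List.pyGetD (PySem.List.pySetD q.1 ((pi.2 : Nat) : Int) (PySem.List.pyGetD q.1 ((pi.2 : Nat) : Int) 0 + 1)) ((pi.2 : Nat) : Int) 0)]))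
          (st.1, ([] : List String))).2]))
      (sequences.map (fun p => pvCnt p.2 0), ([] : List (List String)))
    = (sequences.map (fun p => pvCnt p.2 n),
       (List.range n).map (fun c => sequences.map (fun p => pvCell p.2 c))) := by
  induction n with
  | zero => simp
  | succ n ih =>
    rw [List.range_succ, List.foldl_append, ih, List.foldl_cons, List.foldl_nil]
    have h2 := pv_innerA (n : Int) sequences (fun p => pvCnt p.2 n) 0 [] [] rfl
    simp only [List.nil_append] at h2
    rw [h2]
    dsimp only
    rw [List.map_append]
    refine Prod.ext ?_ ?_ <;> dsimp only
    · apply List.map_congr_left; intro p _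
      rw [pvCnt_succ]
    · rfl

-- B's per-sequence row loop
theorem pv_rowB (p : String × String) (n : Nat) :
    (List.range n).foldl
      (fun (q : Int × List String) (c : Nat) =>
        if PySem.Str.pyGet? p.2 (c : Int) = some '-' then (q.1, q.2 ++ ["-"])
        else (q.1 + 1, q.2 ++ [PySem.Int.toStr (q.1 + 1)]))
      (0, ([] : List String))
    = (pvCnt p.2 n, (List.range n).map (pvCell p.2)) := by
  induction n with
  | zero => simp [pvCnt_zero]
  | succ n ih =>
    rw [List.range_succ, List.foldl_append, ih, List.foldl_cons, List.foldl_nil]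
    rw [List.map_append, pvCnt_succ]
    unfold pvCell
    by_cases h : PySem.Str.pyGet? p.2 (n : Int) = some '-' <;> simp at h <;> simp [h]

-- zip(*rows) of equal-length rows built over range n is the transpose
theorem pv_zipStarGo {α : Type} [Inhabited α] (l : List (String × String)) :
    ∀ (n : Nat) (h : (String × String) → Nat → α),
    pyZipStarGo n (l.map (fun x => (List.range n).map (h x)))
      = (List.range n).map (fun c => l.map (fun x => h x c)) := by
  intro n
  induction n with
  | zero => intro h; simp [pyZipStarGo]
  | succ n ih =>
    intro h
    have hr : ∀ x, (List.range (n+1)).map (h x) = h x 0 :: (List.range n).map (fun c => h x (c+1)) := by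
      intro x
      rw [List.range_succ_eq_map]
      simp [Function.comp, Nat.succ_eq_add_one]
    unfold pyZipStarGo
    have hall : (l.map (fun x => (List.range (n+1)).map (h x))).all (fun r => !r.isEmpty) = true := by
      simp only [List.all_map]
      apply List.all_eq_true.mpr
      intro x _
      simp [hr x]
    rw [hall, if_pos rfl]
    have hhead : (l.map (fun x => (List.range (n+1)).map (h x))).map List.headI
        = l.map (fun x => h x 0) := by
      rw [List.map_map]; apply List.map_congr_left; intro x _; simp [hr x]
    have htail : (l.map (fun x => (List.range (n+1)).map (h x))).map List.tail
        = l.map (fun x => (List.range n).map (fun c => h x (c+1))) := by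
      rw [List.map_map]; apply List.map_congr_left; intro x _; simp [hr x]
    rw [hhead, htail, ih (fun x c => h x (c+1))]
    rw [List.range_succ_eq_map]
    simp [Function.comp, Nat.succ_eq_add_one]

theorem pv_replicate_eq (l : List (String × String)) :
    List.replicate l.length (0 : Int) = l.map (fun p => pvCnt p.2 0) := by
  induction l with
  | nil => rfl
  | cons a t ih => rw [List.length_cons, List.replicate_succ, ih, List.map_cons, pvCnt_zero]

-- both ports compute the transposed cell table
theorem pv_A_eq (sequences : List (String × String)) :
    build_S_vectors sequences
      = (List.range (match PySem.List.pyGet? sequences 0 with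
          | some p => p.2.toList.length | none => 0)).map
          (fun c => sequences.map (fun p => pvCell p.2 c)) := by
  unfold build_S_vectors
  dsimp only
  rw [PySem.List.pyRange_zero_nat, List.foldl_map, pv_replicate_eq, pv_outerA]

theorem pv_B_eq (sequences : List (String × String)) :
    build_S_vectors_alt sequences
      = (List.range (match PySem.List.pyGet? sequences 0 with
          | some p => p.2.toList.length | none => 0)).map
          (fun c => sequences.map (fun p => pvCell p.2 c)) := by
  unfold build_S_vectors_alt
  simp only [PySem.List.pyRange_zero_nat, List.foldl_map]
  have hrows : sequences.map (fun p =>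
      ((List.range (match PySem.List.pyGet? sequences 0 with
          | some p => p.2.toList.length | none => 0)).foldl
        (fun (q : Int × List String) (c : Nat) =>
          if PySem.Str.pyGet? p.2 (c : Int) = some '-' then (q.1, q.2 ++ ["-"])
          else (q.1 + 1, q.2 ++ [PySem.Int.toStr (q.1 + 1)])) (0, ([] : List String))).2)
    = sequences.map (fun p => (List.range (match PySem.List.pyGet? sequences 0 with
          | some p => p.2.toList.length | none => 0)).map (fun c => pvCell p.2 c)) := by
    apply List.map_congr_left; intro p _
    rw [pv_rowB]
  rw [hrows]
  cases sequences with
  | nil => rfl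
  | cons a t =>
    unfold pyZipStar
    simp only [List.map_cons]
    rw [show ((List.range (match PySem.List.pyGet? (a :: t) 0 with
          | some p => p.2.toList.length | none => 0)).map (fun c => pvCell a.2 c)).length
        = (match PySem.List.pyGet? (a :: t) 0 with
          | some p => p.2.toList.length | none => 0) by simp]
    rw [show ((List.range _).map (fun c => pvCell a.2 c) ::
          t.map (fun p => (List.range _).map (fun c => pvCell p.2 c)))
        = (a :: t).map (fun p => (List.range (match PySem.List.pyGet? (a :: t) 0 with
          | some p => p.2.toList.length | none => 0)).map (fun c => pvCell p.2 c)) from rfl]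
    rw [pv_zipStarGo (a :: t) _ (fun p c => pvCell p.2 c)]
    rfl

-- ===== VERDICT (by name: the statement is the Claim_ definition above) =====
theorem build_S_vectors_spec : Claim_equal_build_S_vectors := by
  intro sequences _ _
  unfold Spec_build_S_vectors
  rw [pv_A_eq, pv_B_eq]
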